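-- pv_equiv track=rewrite | github.com/gamazeps/bioinfo | class2/week_3.py | rna_encodes
-- ===== SOURCE A (Python) =====
-- def protein_translate(rna, codons_table):
--     res = ""
--
--     for i in range(0, len(rna), 3):
--         if len(rna[i:]) < 3:
--             break
--         if codons_table[rna[i: i + 3]] is "*":
--             break
--         res += codons_table[rna[i: i + 3]]
--
--     return res
--
-- def rna_encodes(rna, prot, codons_table):
--     res = list()
--     pot = 3 * len(prot)
--     for i in range(0, len(rna) - pot + 1):
--         if protein_translate(rna[i: i + 3*len(prot)], codons_table) == prot:
--             res.append(rna[i:i+len(prot)*3])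
--         if protein_translate(reverse_comp_rna(rna[i: i + 3*len(prot)]), codons_table) == prot:
--             res.append(rna[i:i+len(prot)*3])
--
--     return res
--
-- def reverse_comp_rna(dna):
--     def reverse_char(c):
--         if c is "A":
--             return "U"
--         elif c is "U":
--             return "A"
--         elif c is "G":
--             return "C"
--         else:
--             return "G"
--     res = "".join([reverse_char(c) for c in dna][::-1])
--     return res
-- ===== SOURCE B (Python) =====
-- def rna_encodes(rna, prot, codons_table):
--     n = len(rna)
--     m = len(prot)
--     L = 3 * m
--     if L > n:
--         return []
--     comp = {"A": "U", "U": "A", "G": "C"}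
--     rc = "".join(comp.get(c, "G") for c in reversed(rna))
--     # one dict lookup per position, shared by all windows
--     fwd = [codons_table.get(rna[j:j + 3]) for j in range(n - 2)]
--     rev = [codons_table.get(rc[j:j + 3]) for j in range(n - 2)]
--
--     def matches(vals, start):
--         # incremental prefix match with early exit; no translation string is built
--         p = 0
--         for k in range(m):
--             v = vals[start + 3 * k]
--             if v is None or v == "*":
--                 return p == m
--             if prot[p:p + len(v)] != v:
--                 return False
--             p += len(v)
--         return p == m
--
--     out = []
--     for i in range(n - L + 1):
--         if matches(fwd, i):
--             out.append(rna[i:i + L])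
--         if matches(rev, n - L - i):
--             out.append(rna[i:i + L])
--     return out
-- ===== Notes on version B (the rewrite author's own statement) =====
-- stated objective: alternative
-- what changed: A translates every length-3m window from scratch (building the translation string, a fresh reverse-complement string and a dict lookup per codon per window) and then compares; B builds the reverse-complement string and a per-position codon-value array once (one dict lookup per position, shared by all windows and both strands) and checks each window with an early-exit incremental prefix match against prot, building no translation strings.
-- outside the precondition, e.g. on rna_encodes('AAAGGG', 'MM', {'AAA': '*', 'CCC': '*'}): A returns [], B returns []
import Mathlib
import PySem

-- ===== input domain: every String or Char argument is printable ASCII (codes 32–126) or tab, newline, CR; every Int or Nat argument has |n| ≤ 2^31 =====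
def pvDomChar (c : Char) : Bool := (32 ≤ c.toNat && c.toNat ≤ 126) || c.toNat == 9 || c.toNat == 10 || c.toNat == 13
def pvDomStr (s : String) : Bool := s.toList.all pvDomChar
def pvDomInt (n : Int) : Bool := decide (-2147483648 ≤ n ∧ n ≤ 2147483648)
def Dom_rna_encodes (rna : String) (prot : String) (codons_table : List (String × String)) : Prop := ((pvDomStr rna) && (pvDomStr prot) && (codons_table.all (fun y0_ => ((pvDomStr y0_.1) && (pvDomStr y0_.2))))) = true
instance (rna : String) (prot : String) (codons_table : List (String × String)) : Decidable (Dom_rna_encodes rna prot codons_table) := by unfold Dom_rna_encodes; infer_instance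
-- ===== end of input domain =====

-- B replaces A's per-window translate-then-compare (and per-window reverse complement) by one reverse-complement
-- string and one table lookup per position, shared by all windows, plus an early-exit incremental prefix match.


-- ===== PORT A =====
-- helper reverse_char of reverse_comp_rna; it returns a 1-char string, ported as a Char (the final "".join
-- of 1-char strings is String.ofList of the char list).  CPython note: its 'c is "A"' tests compare interned
-- 1-char strings, hence behave as '=='.
def reverse_char (c : Char) : Char :=
  if c = 'A' then 'U' else if c = 'U' then 'A' else if c = 'G' then 'C' else 'G'

def reverse_comp_rna (dna : List Char) : List Char :=
  (dna.map reverse_char).reverse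

-- the 'for i in range(0, len(rna), 3)' loop of protein_translate, with the two 'break's as early returns.
-- 'codons_table[...]' raises KeyError on a missing codon; that is excluded by Pre_, getD "" keeps the port total.
-- 'codons_table[...] is "*"' compares interned 1-char strings in CPython, hence behaves as '== "*"'.
def pt_go (tbl : PySem.Dict String String) (w : List Char) : List Int → List Char → List Char
  | [], res => res
  | i :: rest, res =>
    if (PySem.List.slice w (some i) none).length < 3 then res
    else
      let v := PySem.Dict.getD tbl (String.ofList (PySem.List.slice w (some i) (some (i + 3)))) ""
      if v = "*" then res
      else pt_go tbl w rest (res ++ v.toList)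

def protein_translate (rna : List Char) (tbl : PySem.Dict String String) : List Char :=
  pt_go tbl rna (PySem.List.pyRange 0 rna.length 3) []

def rna_encodes (rna : String) (prot : String) (codons_table : List (String × String)) : List String :=
  let tbl := PySem.Dict.ofList codons_table
  let r := rna.toList
  let p := prot.toList
  let pot : Int := 3 * p.length
  (PySem.List.pyRange 0 ((r.length : Int) - pot + 1) 1).foldl (fun res i =>
    let w := PySem.List.slice r (some i) (some (i + 3 * (p.length : Int)))
    let res := if protein_translate w tbl = p then res ++ [String.ofList w] else res
    if protein_translate (reverse_comp_rna w) tbl = p then res ++ [String.ofList w] else res) []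

-- ===== PORT B =====
-- comp.get(c, "G") of Source B (a 3-entry dict over 1-char strings)
def bcomp (c : Char) : Char :=
  PySem.Dict.getD (PySem.Dict.ofList [('A', 'U'), ('U', 'A'), ('G', 'C')]) c 'G'

-- matches(vals, start) of Source B: k counts the remaining codons, j the position, p the matched prefix length
def bmatch_go (prot : List Char) (vals : List (Option String)) : Nat → Nat → Nat → Bool
  | 0, _, p => p == prot.length
  | (k+1), j, p =>
    match vals.getD j none with
    | none => p == prot.length
    | some v =>
      if v = "*" then p == prot.length
      else if (prot.drop p).take v.toList.length = v.toList then
        bmatch_go prot vals k (j + 3) (p + v.toList.length)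
      else false

def rna_encodes_alt (rna : String) (prot : String) (codons_table : List (String × String)) : List String :=
  let r := rna.toList
  let p := prot.toList
  let n := r.length
  let m := p.length
  if 3 * m > n then []
  else
    let tbl := PySem.Dict.ofList codons_table
    let rc := r.reverse.map bcomp
    let fwd := (List.range (n - 2)).map (fun j => tbl.get? (String.ofList ((r.drop j).take 3)))
    let rev := (List.range (n - 2)).map (fun j => tbl.get? (String.ofList ((rc.drop j).take 3)))
    (List.range (n - 3 * m + 1)).foldl (fun out i =>
      let out := if bmatch_go p fwd m i 0 then out ++ [String.ofList ((r.drop i).take (3 * m))] else out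
      if bmatch_go p rev m (n - 3 * m - i) 0 then out ++ [String.ofList ((r.drop i).take (3 * m))] else out) []

-- ===== PRECONDITION & SPEC =====
-- Pre_ excludes the inputs on which some looked-up 3-mer of rna (or of its reverse complement) is missing from
-- the table and A raises KeyError; when a window contains a lookup at all (3*len(prot) ≤ len(rna) and prot ≠ ""),
-- it conservatively requires EVERY 3-mer of both strands to be present, which also excludes some returning inputs
-- where a stop codon happens to hide a missing 3-mer (A and B return the same value there too — see the cite).
def Pre_rna_encodes (rna : String) (prot : String) (codons_table : List (String × String)) : Prop :=
  3 * prot.toList.length > rna.toList.length ∨ prot.toList.length = 0 ∨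
  (∀ j ∈ List.range (rna.toList.length - 2),
    (((PySem.Dict.ofList codons_table).get? (String.ofList ((rna.toList.drop j).take 3))).isSome = true ∧
     ((PySem.Dict.ofList codons_table).get? (String.ofList (((rna.toList.reverse.map reverse_char).drop j).take 3))).isSome = true))
instance (rna : String) (prot : String) (codons_table : List (String × String)) : Decidable (Pre_rna_encodes rna prot codons_table) := by unfold Pre_rna_encodes; infer_instance

def pvWitness_rna_encodes : String × String × (List (String × String)) :=
  ("AAAUUU", "K", [("AAA", "K"), ("AAU", "x"), ("AUU", "y"), ("UUU", "z")])

def Spec_rna_encodes (rna : String) (prot : String) (codons_table : List (String × String)) (out : List String) : Prop := out = rna_encodes_alt rna prot codons_table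
instance (rna : String) (prot : String) (codons_table : List (String × String)) (out : List String) : Decidable (Spec_rna_encodes rna prot codons_table out) := by unfold Spec_rna_encodes; infer_instance

-- ===== CLAIM (what is proved, stated in full; the proofs are below) =====
def Claim_equal_rna_encodes : Prop := ∀ (rna : String) (prot : String) (codons_table : List (String × String)), Dom_rna_encodes rna prot codons_table → Pre_rna_encodes rna prot codons_table → Spec_rna_encodes rna prot codons_table (rna_encodes rna prot codons_table)

-- ===== LEMMAS AND PROOFS =====

-- the looked-up value at position j (table value of the 3-mer starting at j)
def tval (tbl : PySem.Dict String String) (r : List Char) (j : Nat) : Option String :=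
  tbl.get? (String.ofList ((r.drop j).take 3))

-- the stop-truncated translation of k codons read at j, j+3, … from a position-indexed value function
def specRest (val : Nat → Option String) : Nat → Nat → List Char
  | 0, _ => []
  | (k+1), j =>
    match val j with
    | none => []
    | some v => if v = "*" then [] else v.toList ++ specRest val (k) (j + 3)

theorem specRest_congr (val1 val2 : Nat → Option String) :
    ∀ (k j j' : Nat), (∀ t < k, val1 (j + 3 * t) = val2 (j' + 3 * t)) →
      specRest val1 k j = specRest val2 k j' := by
  intro k
  induction k with
  | zero => intro j j' _; rfl
  | succ k ih =>
    intro j j' h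
    have h0 := h 0 (by omega)
    simp only [Nat.mul_zero, Nat.add_zero] at h0
    simp only [specRest, h0]
    cases val2 j' with
    | none => rfl
    | some v =>
      simp only
      split
      · rfl
      · rw [ih (j + 3) (j' + 3) (fun t ht => by
          have ht1 := h (t + 1) (by omega)
          have e1 : j + 3 * (t + 1) = (j + 3) + 3 * t := by omega
          have e2 : j' + 3 * (t + 1) = (j' + 3) + 3 * t := by omega
          rw [e1, e2] at ht1
          exact ht1)]

theorem prefix_step (P v rest : List Char) (p : Nat) :
    (P.take p ++ (v ++ rest) = P) ↔
      ((P.drop p).take v.length = v ∧ P.take (p + v.length) ++ rest = P) := by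
  constructor
  · intro h
    have h2 : v ++ rest = P.drop p := by
      have h' : P.take p ++ (v ++ rest) = P.take p ++ P.drop p := by
        rw [h, List.take_append_drop]
      exact List.append_cancel_left h'
    have h1 : (P.drop p).take v.length = v := by
      rw [← h2, List.take_left]
    refine ⟨h1, ?_⟩
    rw [List.take_add, h1, List.append_assoc, h2, List.take_append_drop]
  · rintro ⟨h1, h2⟩
    rw [List.take_add, h1] at h2
    rwa [← List.append_assoc]

theorem take_all_iff (P : List Char) (p : Nat) (hp : p ≤ P.length) :
    (P.take p ++ ([] : List Char) = P) ↔ (p = P.length) := by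
  rw [List.append_nil]
  constructor
  · intro h
    have hl := congrArg List.length h
    simp only [List.length_take] at hl
    omega
  · intro h; subst h; simp

theorem bmatch_spec (prot : List Char) (vals : List (Option String)) :
    ∀ (k j p : Nat), p ≤ prot.length →
      (bmatch_go prot vals k j p = true ↔
        prot.take p ++ specRest (fun j => vals.getD j none) k j = prot) := by
  intro k
  induction k with
  | zero =>
    intro j p hp
    simp only [bmatch_go, specRest, beq_iff_eq, take_all_iff prot p hp]
  | succ k ih =>
    intro j p hp
    simp only [bmatch_go, specRest]
    cases hv : vals.getD j none with
    | none => simp only [beq_iff_eq, take_all_iff prot p hp]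
    | some v =>
      simp only
      split
      · simp only [beq_iff_eq, take_all_iff prot p hp]
      · by_cases hsl : (prot.drop p).take v.toList.length = v.toList
        · simp only [hsl, if_pos]
          have hlen : p + v.toList.length ≤ prot.length := by
            have h1 := congrArg List.length hsl
            simp only [List.length_take, List.length_drop] at h1
            omega
          rw [ih (j + 3) (p + v.toList.length) hlen]
          rw [prefix_step prot v.toList (specRest (fun j => vals.getD j none) k (j + 3)) p]
          exact ⟨fun h2 => ⟨hsl, h2⟩, And.right⟩
        · simp only [hsl, if_false, Bool.false_eq_true, false_iff]
          intro hcontra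
          rw [prefix_step] at hcontra
          exact hsl hcontra.1

theorem pt_go_spec (tbl : PySem.Dict String String) (w : List Char) :
    ∀ (k t : Nat) (res : List Char), (∀ u < k, tval tbl w (3 * (t + u)) ≠ none) →
      3 * (t + k) = w.length →
      pt_go tbl w ((List.range k).map (fun u => ((3 * (t + u) : Nat) : Int))) res =
        res ++ specRest (fun j => tval tbl w j) k (3 * t) := by
  intro k
  induction k with
  | zero => intro t res _ _; simp [pt_go, specRest]
  | succ k ih =>
    intro t res hcov hlen
    rw [List.range_succ_eq_map, List.map_cons, List.map_map]
    show pt_go tbl w (((3 * (t + 0) : Nat) : Int) :: _) res = _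
    have hv0 := hcov 0 (by omega)
    simp only [Nat.add_zero] at *
    rw [pt_go]
    have hslice1 : (PySem.List.slice w (some ((3 * t : Nat) : Int)) none) = w.drop (3 * t) :=
      PySem.List.slice_from_natCast w (3 * t)
    have hslice2 : PySem.List.slice w (some ((3 * t : Nat) : Int)) (some (((3 * t : Nat) : Int) + 3)) =
        (w.drop (3 * t)).take 3 := by
      have h2 := PySem.List.slice_natCast_add w (3 * t) 3
      simpa using h2
    rw [hslice1, hslice2]
    have hlen3 : ¬ (w.drop (3 * t)).length < 3 := by
      simp only [List.length_drop]; omega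
    rw [if_neg hlen3]
    obtain ⟨v, hv⟩ : ∃ v, tval tbl w (3 * t) = some v := by
      cases h : tval tbl w (3 * t) with
      | none => exact absurd h hv0
      | some v => exact ⟨v, rfl⟩
    have hgetD : PySem.Dict.getD tbl (String.ofList ((w.drop (3 * t)).take 3)) "" = v := by
      rw [PySem.Dict.getD_eq_get?_getD]
      have hg : tbl.get? (String.ofList ((w.drop (3 * t)).take 3)) = some v := hv
      rw [hg]; rfl
    rw [hgetD]
    have hspec : specRest (fun j => tval tbl w j) (k + 1) (3 * t) =
        (if v = "*" then [] else v.toList ++ specRest (fun j => tval tbl w j) k (3 * t + 3)) := by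
      simp only [specRest, hv]
    rw [hspec]
    by_cases hstop : v = "*"
    · rw [if_pos hstop, if_pos hstop, List.append_nil]
    · rw [if_neg hstop, if_neg hstop]
      have hmap : (List.range k).map ((fun u => ((3 * (t + u) : Nat) : Int)) ∘ (fun n => n + 1)) =
          (List.range k).map (fun u => ((3 * ((t + 1) + u) : Nat) : Int)) := by
        apply List.map_congr_left
        intro u _
        simp only [Function.comp]
        congr 1
        omega
      rw [hmap, ih (t + 1) (res ++ v.toList) (fun u hu => by
          have hcu := hcov (u + 1) (by omega)
          have e : 3 * (t + (u + 1)) = 3 * ((t + 1) + u) := by omega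
          rwa [e] at hcu) (by omega)]
      rw [List.append_assoc]
      have e3 : 3 * (t + 1) = 3 * t + 3 := by ring
      rw [e3]

theorem translate_spec (tbl : PySem.Dict String String) (w : List Char) (m : Nat)
    (hw : w.length = 3 * m) (hcov : ∀ u < m, tval tbl w (3 * u) ≠ none) :
    protein_translate w tbl = specRest (fun j => tval tbl w j) m 0 := by
  unfold protein_translate
  have hr : PySem.List.pyRange 0 (w.length) 3 = (List.range m).map (fun u => ((3 * (0 + u) : Nat) : Int)) := by
    rw [PySem.List.pyRange_of_pos 0 w.length (by norm_num), hw]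
    rcases Nat.eq_zero_or_pos m with hm | hm
    · subst hm; simp
    · have hlt : (0 : Int) < ((3 * m : Nat) : Int) := by positivity
      rw [if_pos hlt]
      have he : ((((3 * m : Nat) : Int) - 0 + 3 - 1) / 3).toNat = m := by omega
      rw [he]
      apply List.map_congr_left
      intro u _
      push_cast
      ring
  rw [hr, pt_go_spec tbl w m 0 [] (fun u hu => by simpa using hcov u hu) (by omega)]
  simp

theorem tval_window (tbl : PySem.Dict String String) (r : List Char) (i m u : Nat)
    (hu : u < m) (_him : i + 3 * m ≤ r.length) :
    tval tbl ((r.drop i).take (3 * m)) (3 * u) = tval tbl r (i + 3 * u) := by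
  unfold tval
  congr 2
  rw [List.drop_take, List.drop_drop, List.take_take]
  congr 1
  omega

theorem getD_range_map {α : Type} (f : Nat → α) (d : α) (K j : Nat) (hj : j < K) :
    ((List.range K).map f).getD j d = f j := by
  rw [List.getD_eq_getElem?_getD, List.getElem?_map, List.getElem?_range hj]
  rfl

-- forward/reverse unified: A's translate of the window equals prot iff B's matcher accepts
theorem window_iff (tbl : PySem.Dict String String) (r p : List Char) (m i : Nat)
    (hm : m = p.length) (him : i + 3 * m ≤ r.length)
    (hcov : ∀ u < m, tval tbl r (i + 3 * u) ≠ none) :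
    (protein_translate ((r.drop i).take (3 * m)) tbl = p ↔
      bmatch_go p ((List.range (r.length - 2)).map (fun j => tbl.get? (String.ofList ((r.drop j).take 3)))) m i 0 = true) := by
  set w := (r.drop i).take (3 * m) with hwdef
  set vals := (List.range (r.length - 2)).map (fun j => tbl.get? (String.ofList ((r.drop j).take 3))) with hvals
  have hwlen : w.length = 3 * m := by
    simp only [hwdef, List.length_take, List.length_drop]
    omega
  have hcovw : ∀ u < m, tval tbl w (3 * u) ≠ none := by
    intro u hu
    rw [hwdef, tval_window tbl r i m u hu him]
    exact hcov u hu
  have hts := translate_spec tbl w m hwlen hcovw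
  have hcong : specRest (fun j => tval tbl w j) m 0 = specRest (fun j => vals.getD j none) m i := by
    apply specRest_congr
    intro t ht
    have hidx : i + 3 * t < r.length - 2 := by omega
    rw [Nat.zero_add, hwdef, tval_window tbl r i m t ht him, hvals,
        getD_range_map _ _ _ _ hidx]
    rfl
  rw [bmatch_spec p vals m i 0 (by omega), List.take_zero, List.nil_append, hts, hcong]

theorem bcomp_eq_reverse_char (c : Char) : bcomp c = reverse_char c := by
  simp only [bcomp, reverse_char, PySem.Dict.getD_eq_get?_getD]
  have hofl : PySem.Dict.ofList [('A', 'U'), ('U', 'A'), ('G', 'C')] =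
      PySem.Dict.mk [('A', 'U'), ('U', 'A'), ('G', 'C')] := by decide
  rw [hofl]
  simp only [PySem.Dict.get?_mk_cons, beq_iff_eq]
  split_ifs with h1 h2 h3 <;> simp_all [eq_comm] <;> rfl

theorem revcomp_window (r : List Char) (i m : Nat) (him : i + 3 * m ≤ r.length) :
    reverse_comp_rna ((r.drop i).take (3 * m)) =
      ((r.reverse.map bcomp).drop (r.length - 3 * m - i)).take (3 * m) := by
  have hb : r.reverse.map bcomp = (r.map reverse_char).reverse := by
    rw [List.map_reverse]
    congr 1
    exact List.map_congr_left (fun c _ => bcomp_eq_reverse_char c)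
  rw [hb]
  set z := r.map reverse_char with hz
  have hzl : z.length = r.length := by simp [hz]
  have h1 : z.reverse.drop (r.length - 3 * m - i) = (z.take (i + 3 * m)).reverse := by
    rw [List.drop_reverse, hzl]
    have e : r.length - (r.length - 3 * m - i) = i + 3 * m := by omega
    rw [e]
  rw [h1, List.take_reverse]
  have h2 : (z.take (i + 3 * m)).length - 3 * m = i := by
    simp only [List.length_take]
    omega
  rw [h2, List.drop_take]
  have h3 : i + 3 * m - i = 3 * m := by omega
  rw [h3]
  unfold reverse_comp_rna
  rw [List.map_take, List.map_drop, ← hz]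

-- ===== VERDICT (by name: the statement is the Claim_ definition above) =====
theorem rna_encodes_spec : Claim_equal_rna_encodes := by
  intro rna prot codons_table _ hpre
  unfold Pre_rna_encodes at hpre
  unfold Spec_rna_encodes rna_encodes rna_encodes_alt
  simp only []
  set tbl := PySem.Dict.ofList codons_table with htbl
  set r := rna.toList with hr
  set p := prot.toList with hp
  set m := p.length with hm
  set n := r.length with hn
  by_cases hbig : 3 * m > n
  · -- the loop range is empty on both sides
    rw [if_pos hbig]
    have hnil : PySem.List.pyRange 0 ((n : Int) - 3 * (m : Int) + 1) 1 = [] := by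
      apply PySem.List.pyRange_one_eq_nil
      omega
    rw [hnil]
    rfl
  · rw [if_neg hbig]
    have hmn : 3 * m ≤ n := by omega
    -- A's Int range is B's Nat range
    have hcast : (n : Int) - 3 * (m : Int) + 1 = ((n - 3 * m + 1 : Nat) : Int) := by omega
    rw [hcast, PySem.List.pyRange_zero_natCast, List.foldl_map]
    -- coverage of every looked-up codon, on both strands
    have hcov : ∀ i u : Nat, i + 3 * u ≤ n - 3 → m ≠ 0 →
        tval tbl r (i + 3 * u) ≠ none ∧ tval tbl (r.reverse.map bcomp) (i + 3 * u) ≠ none := by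
      intro i u hiu hm0
      rcases hpre with h | h | h
      · omega
      · omega
      · have hj := h (i + 3 * u) (by
          rw [List.mem_range]
          omega)
        have hrc : r.reverse.map bcomp = r.reverse.map reverse_char :=
          List.map_congr_left (fun c _ => bcomp_eq_reverse_char c)
        constructor
        · exact Option.isSome_iff_ne_none.mp hj.1
        · rw [hrc]
          exact Option.isSome_iff_ne_none.mp hj.2
    apply PySem.List.foldl_congr_mem
    intro acc i hi
    have hile : i ≤ n - 3 * m := by
      rw [List.mem_range] at hi
      omega
    have him : i + 3 * m ≤ n := by omega
    -- the window slice is drop/take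
    have hw : PySem.List.slice r (some ((i : Nat) : Int))
        (some (((i : Nat) : Int) + 3 * (p.length : Int))) = (r.drop i).take (3 * m) := by
      have hcast2 : ((i : Nat) : Int) + 3 * (p.length : Int) = ((i : Nat) : Int) + ((3 * m : Nat) : Int) := by
        push_cast [hm]
        ring
      rw [hcast2, PySem.List.slice_natCast_add]
    rw [hw]
    -- the forward condition
    have hcovF : ∀ u < m, tval tbl r (i + 3 * u) ≠ none := by
      intro u hu
      exact (hcov i u (by omega) (by omega)).1
    have hiff1 := window_iff tbl r p m i hm him hcovF
    -- the reverse condition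
    set rc := r.reverse.map bcomp with hrcdef
    have hrclen : rc.length = n := by
      simp [hrcdef, hn]
    have hcovR : ∀ u < m, tval tbl rc ((n - 3 * m - i) + 3 * u) ≠ none := by
      intro u hu
      exact (hcov (n - 3 * m - i) u (by omega) (by omega)).2
    have him' : (n - 3 * m - i) + 3 * m ≤ rc.length := by omega
    have hiff2 : protein_translate (reverse_comp_rna ((r.drop i).take (3 * m))) tbl = p ↔
        bmatch_go p ((List.range (n - 2)).map (fun j => tbl.get? (String.ofList ((rc.drop j).take 3)))) m (n - 3 * m - i) 0 = true := by
      rw [revcomp_window r i m him, ← hrcdef]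
      have hwin := window_iff tbl rc p m (n - 3 * m - i) hm him' hcovR
      rwa [hrclen] at hwin
    rw [if_congr hiff1 rfl rfl, if_congr hiff2 rfl rfl]
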